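-- pv_equiv track=rewrite | github.com/juanbajuarez/Estructura_de_datos | Examen_Parcial_2/Ej2_conversiones_decimal_binario_hexadecimal.py | hexadecimal_decimal_y_binario
-- ===== SOURCE A (Python) =====
-- def cal_decimal(valor):
--     decimal=valor
--     if valor=='A' or valor=='a':
--         decimal=10
--     elif valor=='B' or valor=='b':
--         decimal=11
--     elif valor=='C' or valor=='c':
--         decimal=12
--     elif valor=='D' or valor=='d':
--         decimal=13
--     elif valor=='E' or valor=='e':
--         decimal=14
--     elif valor=='F' or valor=='f':
--         decimal=15
--     return decimal
--
-- def decimal_binario(numero):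
--     #conversion a binario:
--     num1=numero
--     binario=[]
--     while num1!=0:
--         residuo=num1%2
--         num1=num1//2
--         binario.append(residuo)
--     binario.reverse()
--     return binario
--
-- def hexadecimal_decimal_y_binario(numero):
--     decimal = []
--     valor_decimal=[]
--     tam = len(numero)
--     acum=0
--     #Conversion de caracteres a enteros.
--     for i in range(0,tam):
--         val=cal_decimal(numero[i])
--         decimal.append(val)
--     #Calcula el valor decimal.
--     for i in range(tam):
--         acum += int(decimal[tam - 1 - i]) * (16 ** i)
--     valor_decimal.append(acum)
--     #El valor binario se realiza por función.
--     return valor_decimal,decimal_binario(acum)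
-- ===== SOURCE B (Python) =====
-- def hexadecimal_decimal_y_binario(numero):
--     # Single Horner pass instead of map-to-digit-list + weighted-power sum;
--     # binary digits built most-significant-first by prepending, no final reverse.
--     acum = 0
--     for c in numero:
--         acum = 16 * acum + int(c, 16)
--     bits = []
--     n = acum
--     while n:
--         bits.insert(0, n % 2)
--         n //= 2
--     return [acum], bits
-- ===== Notes on version B (the rewrite author's own statement) =====
-- stated objective: simpler
-- what changed: Replaced the intermediate digit list and the second weighted-power-sum loop by a single Horner pass over the string, and the append-then-reverse binary while-loop by one that prepends each bit, needing no final reverse; both raise ValueError on non-hex characters exactly as A does (excluded by Pre_).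
import Mathlib
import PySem

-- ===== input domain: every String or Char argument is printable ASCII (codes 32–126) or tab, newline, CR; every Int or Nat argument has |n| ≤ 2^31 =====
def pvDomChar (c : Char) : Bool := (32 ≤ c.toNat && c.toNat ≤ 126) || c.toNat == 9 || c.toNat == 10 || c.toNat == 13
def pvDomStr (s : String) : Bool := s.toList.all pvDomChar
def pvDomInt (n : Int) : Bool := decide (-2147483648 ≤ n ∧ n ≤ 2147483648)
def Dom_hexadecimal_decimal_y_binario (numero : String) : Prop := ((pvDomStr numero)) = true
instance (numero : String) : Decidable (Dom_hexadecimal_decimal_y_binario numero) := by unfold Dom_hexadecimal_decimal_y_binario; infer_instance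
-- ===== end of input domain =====

-- B replaces the digit list + weighted-power sum by one Horner pass, and the
-- append+reverse binary loop by one that prepends bits, needing no reverse (objective: simpler).

-- ===== PORT A =====
-- cal_decimal returns the int for A..F/a..f and otherwise the character itself (heterogeneous).
def calDecimal (valor : Char) : Char ⊕ Int :=
  if valor = 'A' ∨ valor = 'a' then Sum.inr 10
  else if valor = 'B' ∨ valor = 'b' then Sum.inr 11
  else if valor = 'C' ∨ valor = 'c' then Sum.inr 12
  else if valor = 'D' ∨ valor = 'd' then Sum.inr 13
  else if valor = 'E' ∨ valor = 'e' then Sum.inr 14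
  else if valor = 'F' ∨ valor = 'f' then Sum.inr 15
  else Sum.inl valor

-- int(x) applied to an element of `decimal`; on a non-digit char Python raises
-- ValueError (excluded by Pre_), here default 0.
def pyIntHet (v : Char ⊕ Int) : Int :=
  match v with
  | Sum.inl c => (PySem.Int.ofStr? (String.ofList [c])).getD 0
  | Sum.inr n => n

-- while num1 != 0 loop of decimal_binario; the guard is `≤ 0` only to make the
-- port total (Python diverges on negative input, which is unreachable here).
def decBinLoop (num1 : Int) (binario : List Int) : List Int :=
  if num1 ≤ 0 then binario.reverse
  else decBinLoop (PySem.Int.floordiv num1 2) (binario ++ [PySem.Int.mod num1 2])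
termination_by num1.toNat
decreasing_by
  simp only [PySem.Int.floordiv_eq_ediv_of_pos (by omega : (0:Int) < 2)]
  omega

def decimalBinario (numero : Int) : List Int := decBinLoop numero []

def hexadecimal_decimal_y_binario (numero : String) : List Int × List Int :=
  let cs := numero.toList
  let tam : Int := cs.length
  let decimal : List (Char ⊕ Int) :=
    (PySem.List.pyRange 0 tam 1).foldl
      (fun acc i => acc ++ [calDecimal (PySem.List.pyGetD cs i ' ')]) []
  let acum : Int :=
    (PySem.List.pyRange 0 tam 1).foldl
      (fun acum i => acum + pyIntHet (PySem.List.pyGetD decimal (tam - 1 - i) (Sum.inr 0)) * 16 ^ i.toNat) 0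
  ([acum], decimalBinario acum)

-- ===== PORT B =====
-- int(c, 16); default 0 only outside Pre_ (Python raises ValueError there).
def hexVal (c : Char) : Int := (PySem.Int.ofCharsBase? [c] 16).getD 0

-- while n: bits.insert(0, n % 2); n //= 2   (guard `≤ 0` for totality; negative unreachable)
def bitsLoopAlt (n : Int) (bits : List Int) : List Int :=
  if n ≤ 0 then bits
  else bitsLoopAlt (PySem.Int.floordiv n 2) (PySem.Int.mod n 2 :: bits)
termination_by n.toNat
decreasing_by
  simp only [PySem.Int.floordiv_eq_ediv_of_pos (by omega : (0:Int) < 2)]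
  omega

def hexadecimal_decimal_y_binario_alt (numero : String) : List Int × List Int :=
  let acum : Int := numero.toList.foldl (fun a c => 16 * a + hexVal c) 0
  ([acum], bitsLoopAlt acum [])

-- ===== PRECONDITION & SPEC =====
-- Pre_ excludes exactly the strings containing a non-hex-digit character, on which
-- both Pythons raise ValueError (int() on a non-digit / int(c, 16) on a non-hex char).
def Pre_hexadecimal_decimal_y_binario (numero : String) : Prop :=
  (numero.toList.all (fun c =>
    ('0' ≤ c && c ≤ '9') || ('a' ≤ c && c ≤ 'f') || ('A' ≤ c && c ≤ 'F'))) = true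
instance (numero : String) : Decidable (Pre_hexadecimal_decimal_y_binario numero) := by
  unfold Pre_hexadecimal_decimal_y_binario; infer_instance

def pvWitness_hexadecimal_decimal_y_binario : String := "1aF0"

def Spec_hexadecimal_decimal_y_binario (numero : String) (out : List Int × List Int) : Prop := out = hexadecimal_decimal_y_binario_alt numero
instance (numero : String) (out : List Int × List Int) : Decidable (Spec_hexadecimal_decimal_y_binario numero out) := by unfold Spec_hexadecimal_decimal_y_binario; infer_instance

-- ===== CLAIM (what is proved, stated in full; the proofs are below) =====
def Claim_equal_hexadecimal_decimal_y_binario : Prop := ∀ (numero : String), Dom_hexadecimal_decimal_y_binario numero → Pre_hexadecimal_decimal_y_binario numero → Spec_hexadecimal_decimal_y_binario numero (hexadecimal_decimal_y_binario numero)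

-- ===== LEMMAS AND PROOFS =====

-- per-character agreement of the two digit valuations, by finite check over ASCII
lemma val_agree_lt128 : ∀ n : Nat, n < 128 → pyIntHet (calDecimal (Char.ofNat n)) = hexVal (Char.ofNat n) := by
  decide

lemma val_agree (c : Char) (h : c.toNat < 128) : pyIntHet (calDecimal c) = hexVal c := by
  have := val_agree_lt128 c.toNat h
  rwa [Char.ofNat_toNat] at this

-- the two binary loops agree (generalised over the accumulators)
lemma decBinLoop_eq (n : Int) (acc : List Int) : decBinLoop n acc = bitsLoopAlt n acc.reverse := by
  rw [decBinLoop, bitsLoopAlt]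
  split
  · rfl
  · rw [decBinLoop_eq (PySem.Int.floordiv n 2) (acc ++ [PySem.Int.mod n 2])]
    simp
termination_by n.toNat
decreasing_by
  simp only [PySem.Int.floordiv_eq_ediv_of_pos (by omega : (0:Int) < 2)]
  omega

-- Horner fold with arbitrary start
lemma horner_start (ws : List Int) (a : Int) :
    ws.foldl (fun x y => 16 * x + y) a
      = a * 16 ^ ws.length + ws.foldl (fun x y => 16 * x + y) 0 := by
  induction ws generalizing a with
  | nil => simp
  | cons w ws ih =>
    simp only [List.foldl_cons, List.length_cons]
    rw [ih (16 * a + w), ih (16 * 0 + w)]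
    ring

-- A's weighted sum over the value list equals Horner's fold
lemma sum_eq_horner (ws : List Int) :
    (List.range ws.length).foldl
        (fun a i => a + ws.getD (ws.length - 1 - i) 0 * (16:Int) ^ i) 0
      = ws.foldl (fun x y => 16 * x + y) 0 := by
  induction ws with
  | nil => simp
  | cons w ws ih =>
    have h1 : (w :: ws).length = ws.length + 1 := rfl
    rw [h1, List.range_succ, List.foldl_append]
    have hcongr :
        (List.range ws.length).foldl
            (fun a i => a + (w :: ws).getD (ws.length + 1 - 1 - i) 0 * (16:Int) ^ i) 0
          = (List.range ws.length).foldl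
            (fun a i => a + ws.getD (ws.length - 1 - i) 0 * (16:Int) ^ i) 0 := by
      apply PySem.List.foldl_congr_mem
      intro a i hi
      have hilt : i < ws.length := List.mem_range.mp hi
      have hsh : ws.length + 1 - 1 - i = (ws.length - 1 - i) + 1 := by omega
      rw [hsh, List.getD_cons_succ]
    rw [hcongr, ih]
    simp only [List.foldl_cons, List.foldl_nil]
    have h0 : ws.length + 1 - 1 - ws.length = 0 := by omega
    rw [h0, List.getD_cons_zero, horner_start ws (16 * 0 + w)]
    ring

-- first loop of A builds exactly the mapped digit list
lemma decimal_list_eq (cs : List Char) :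
    (PySem.List.pyRange 0 (cs.length : Int) 1).foldl
        (fun acc i => acc ++ [calDecimal (PySem.List.pyGetD cs i ' ')]) []
      = cs.map calDecimal := by
  rw [PySem.List.foldl_append_singleton_eq_map]
  have hm : (PySem.List.pyRange 0 (cs.length : Int) 1).map
        (fun i => calDecimal (PySem.List.pyGetD cs i ' '))
      = ((PySem.List.pyRange 0 (cs.length : Int) 1).map
          (fun i => PySem.List.pyGetD cs i ' ')).map calDecimal := by
    rw [List.map_map]; rfl
  rw [hm, PySem.List.map_pyGetD_pyRange_zero']
  simp

-- ===== VERDICT (by name: the statement is the Claim_ definition above) =====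
theorem hexadecimal_decimal_y_binario_spec : Claim_equal_hexadecimal_decimal_y_binario := by
  intro numero hdom _hpre
  unfold Spec_hexadecimal_decimal_y_binario
  unfold hexadecimal_decimal_y_binario hexadecimal_decimal_y_binario_alt
  simp only []
  set cs := numero.toList with hcs
  -- characters are ASCII (< 128) by Dom
  have hascii : ∀ c ∈ cs, c.toNat < 128 := by
    intro c hc
    have : pvDomChar c = true := by
      have := hdom
      unfold Dom_hexadecimal_decimal_y_binario pvDomStr at this
      exact List.all_eq_true.mp this c hc
    unfold pvDomChar at this
    simp only [Bool.or_eq_true, Bool.and_eq_true, decide_eq_true_eq, beq_iff_eq] at this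
    omega
  rw [decimal_list_eq cs]
  -- rewrite A's accumulator loop to the Nat-range weighted sum over ws
  set ws : List Int := cs.map (fun c => pyIntHet (calDecimal c)) with hws
  have hlen : ws.length = cs.length := by simp [hws]
  have hstep :
      (PySem.List.pyRange 0 (cs.length : Int) 1).foldl
          (fun acum i => acum + pyIntHet (PySem.List.pyGetD (cs.map calDecimal) ((cs.length : Int) - 1 - i) (Sum.inr 0)) * 16 ^ i.toNat) 0
        = (List.range ws.length).foldl
          (fun a i => a + ws.getD (ws.length - 1 - i) 0 * (16:Int) ^ i) 0 := by
    rw [PySem.List.pyRange_one]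
    simp only [sub_zero, Int.toNat_natCast, List.foldl_map, hlen]
    apply PySem.List.foldl_congr_mem
    intro a k hk
    have hklt : k < cs.length := List.mem_range.mp hk
    have hidx : ((cs.length : Int) - 1 - (0 + (k : Int))) = ((cs.length - 1 - k : Nat) : Int) := by
      omega
    rw [hidx, PySem.List.pyGetD_natCast]
    have hlt : cs.length - 1 - k < (cs.map calDecimal).length := by
      simp only [List.length_map]; omega
    rw [List.getD_eq_getElem _ _ hlt]
    have hlt' : cs.length - 1 - k < ws.length := by omega
    rw [List.getD_eq_getElem _ _ hlt']
    simp [hws]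
  rw [hstep, sum_eq_horner ws]
  -- Horner over ws equals B's fold (per-character value agreement)
  have hfold : ws.foldl (fun x y => 16 * x + y) 0
      = cs.foldl (fun a c => 16 * a + hexVal c) 0 := by
    rw [hws, List.foldl_map]
    apply PySem.List.foldl_congr_mem
    intro a c hc
    rw [val_agree c (hascii c hc)]
  rw [hfold]
  -- binary parts agree
  unfold decimalBinario
  rw [decBinLoop_eq]
  rfl
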